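-- pv_equiv track=rewrite | github.com/MYVirajani/AI-Exam-Evaluation-System | model/src/prompts/rag_prompts.py | format_context_chunks
-- ===== SOURCE A (Python) =====
-- def format_context_chunks(chunks: list, max_length: int = 2000) -> str:
--     """Format multiple context chunks into a single string."""
--     formatted_chunks = []
--     current_length = 0
--
--     for i, chunk in enumerate(chunks, 1):
--         chunk_text = f"**Source {i}:**\n{chunk}\n"
--         if current_length + len(chunk_text) <= max_length:
--             formatted_chunks.append(chunk_text)
--             current_length += len(chunk_text)
--         else:
--             break
--
--     return "\n".join(formatted_chunks)
-- ===== SOURCE B (Python) =====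
-- def format_context_chunks(chunks: list, max_length: int = 2000) -> str:
--     """Format multiple context chunks into a single string."""
--     # Build every formatted text up front, then its prefix-sum of lengths,
--     # then keep the maximal leading run whose cumulative length fits.
--     texts = ["**Source %d:**\n%s\n" % (i, chunk) for i, chunk in enumerate(chunks, 1)]
--     sums = []
--     total = 0
--     for t in texts:
--         total += len(t)
--         sums.append(total)
--     kept = []
--     for t, s in zip(texts, sums):
--         if s > max_length:
--             break
--         kept.append(t)
--     return "\n".join(kept)
-- ===== Notes on version B (the rewrite author's own statement) =====
-- stated objective: alternative
-- what changed: Instead of one stateful loop that interleaves formatting, length accounting and appending, B builds all formatted texts first, computes a prefix-sum of their lengths, and selects the maximal leading run whose cumulative length fits (take-while over zip), then joins.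
import Mathlib
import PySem

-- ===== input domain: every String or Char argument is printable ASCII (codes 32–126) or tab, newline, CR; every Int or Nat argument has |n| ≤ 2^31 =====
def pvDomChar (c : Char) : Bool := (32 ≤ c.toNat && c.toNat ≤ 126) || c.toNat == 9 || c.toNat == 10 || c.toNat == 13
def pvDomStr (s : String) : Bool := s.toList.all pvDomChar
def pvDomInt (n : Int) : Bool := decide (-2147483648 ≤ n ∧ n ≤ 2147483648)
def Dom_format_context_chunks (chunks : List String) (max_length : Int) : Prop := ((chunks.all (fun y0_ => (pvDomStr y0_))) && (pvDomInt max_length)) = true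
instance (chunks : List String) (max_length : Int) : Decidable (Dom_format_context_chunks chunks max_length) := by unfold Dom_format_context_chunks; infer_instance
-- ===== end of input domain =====

-- B replaces A's single stateful budget loop by a three-stage pipeline (format all, prefix-sum lengths, take-while over the zipped pairs); alternative decomposition, same cost.


-- the f-string f"**Source {i}:**\n{chunk}\n", identical in both sources
def pvMkText (i : Int) (chunk : String) : String :=
  "**Source " ++ PySem.Int.toStr i ++ ":**\n" ++ chunk ++ "\n"

-- ===== PORT A =====
-- A's for-loop with break: state = (index i, current_length); returns the list A joins at the end
def pvLoopA (max_length : Int) : List String → Int → Int → List String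
  | [], _, _ => []
  | chunk :: rest, i, cur =>
    let t := pvMkText i chunk
    if cur + PySem.Str.len t ≤ max_length then
      t :: pvLoopA max_length rest (i + 1) (cur + PySem.Str.len t)
    else []

def format_context_chunks (chunks : List String) (max_length : Int) : String :=
  PySem.Str.join "\n" (pvLoopA max_length chunks 1 0)

-- ===== PORT B =====
-- Source B's first comprehension: all formatted texts, indices from 1
def pvTextsB : List String → Int → List String
  | [], _ => []
  | chunk :: rest, i => pvMkText i chunk :: pvTextsB rest (i + 1)

-- Source B's prefix-sum loop over the texts
def pvSumsB : List String → Int → List Int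
  | [], _ => []
  | t :: rest, total => (total + PySem.Str.len t) :: pvSumsB rest (total + PySem.Str.len t)

def format_context_chunks_alt (chunks : List String) (max_length : Int) : String :=
  let texts := pvTextsB chunks 1
  let sums := pvSumsB texts 0
  let kept := ((texts.zip sums).takeWhile (fun p => decide (p.2 ≤ max_length))).map Prod.fst
  PySem.Str.join "\n" kept

-- ===== PRECONDITION & SPEC =====
def Spec_format_context_chunks (chunks : List String) (max_length : Int) (out : String) : Prop := out = format_context_chunks_alt chunks max_length
instance (chunks : List String) (max_length : Int) (out : String) : Decidable (Spec_format_context_chunks chunks max_length out) := by unfold Spec_format_context_chunks; infer_instance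

-- ===== CLAIM (what is proved, stated in full; the proofs are below) =====
def Claim_equal_format_context_chunks : Prop := ∀ (chunks : List String) (max_length : Int), Dom_format_context_chunks chunks max_length → Spec_format_context_chunks chunks max_length (format_context_chunks chunks max_length)

-- ===== LEMMAS AND PROOFS =====
theorem pvLoop_eq_pipeline (max_length : Int) (chunks : List String) (i cur : Int) :
    pvLoopA max_length chunks i cur =
      (((pvTextsB chunks i).zip (pvSumsB (pvTextsB chunks i) cur)).takeWhile
        (fun p => decide (p.2 ≤ max_length))).map Prod.fst := by
  induction chunks generalizing i cur with
  | nil => simp [pvLoopA, pvTextsB, pvSumsB]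
  | cons c rest ih =>
    simp only [pvLoopA, pvTextsB, pvSumsB, List.zip_cons_cons, List.takeWhile_cons, decide_eq_true_eq]
    rw [PySem.Str.len_eq]
    split_ifs with h
    · simp [ih]
    · simp

-- ===== VERDICT (by name: the statement is the Claim_ definition above) =====
theorem format_context_chunks_spec : Claim_equal_format_context_chunks := by
  intro chunks max_length _
  unfold Spec_format_context_chunks format_context_chunks format_context_chunks_alt
  rw [pvLoop_eq_pipeline]
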